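-- pv_equiv track=rewrite | github.com/tertsdiepraam/SortViz | algorithms.py | circle_sort
-- ===== SOURCE A (Python) =====
-- def swap(a, x, y):
--     a[x], a[y] = a[y], a[x]
--
-- def circle_sort(a):
--     def circle_sort_inner(a, lo, hi, swaps):
--         if lo == hi:
--             return
--
--         lower = lo
--         upper = hi
--         mid = (hi - lo)//2
--
--         while lo < hi:
--             yield (lo, hi)
--             if a[lo] > a[hi]:
--                 swap(a, lo, hi)
--                 swaps['a'] += 1
--             lo += 1
--             hi -= 1
--
--         if lo == hi:
--             yield (lo, hi + 1)
--             if a[lo] > a[hi + 1]: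
--                 swap(a, lo, hi+1)
--                 swaps['a']
--
--         yield from circle_sort_inner(a, lower, lower+mid, swaps)
--         yield from circle_sort_inner(a, lower+mid+1, upper, swaps)
--
--     swaps = {'a': 1}
--     while swaps['a']:
--         swaps['a'] = 0
--         yield from circle_sort_inner(a, 0, len(a)-1, swaps)
-- ===== SOURCE B (Python) =====
-- def circle_sort(a):
--     # Same comparison/swap steps as the recursive version, but with an
--     # explicit stack of segments and a counted pair sweep instead of
--     # two moving pointers.  Mutates `a` in place like the original.
--     swaps = {'a': 1}
--     while swaps['a']:
--         swaps['a'] = 0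
--         stack = [(0, len(a) - 1)]
--         while stack:
--             lo, hi = stack.pop()
--             d = hi - lo
--             if d <= 0:
--                 continue
--             pairs = (d + 1) // 2
--             for k in range(pairs):
--                 i, j = lo + k, hi - k
--                 yield (i, j)
--                 if a[i] > a[j]:
--                     a[i], a[j] = a[j], a[i]
--                     swaps['a'] += 1
--             if d % 2 == 0:
--                 m = lo + pairs
--                 yield (m, m + 1)
--                 if a[m] > a[m + 1]:
--                     a[m], a[m + 1] = a[m + 1], a[m]
--             mid = d // 2
--             stack.append((lo + mid + 1, hi))
--             stack.append((lo, lo + mid))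
-- ===== Notes on version B (the rewrite author's own statement) =====
-- stated objective: alternative
-- what changed: The recursive inner generator is replaced by an explicit stack of segments (right child pushed before left), and the two-moving-pointer sweep by a counted for-range over the segment's index pairs; same steps, same in-place swaps, same cost.
import Mathlib
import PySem

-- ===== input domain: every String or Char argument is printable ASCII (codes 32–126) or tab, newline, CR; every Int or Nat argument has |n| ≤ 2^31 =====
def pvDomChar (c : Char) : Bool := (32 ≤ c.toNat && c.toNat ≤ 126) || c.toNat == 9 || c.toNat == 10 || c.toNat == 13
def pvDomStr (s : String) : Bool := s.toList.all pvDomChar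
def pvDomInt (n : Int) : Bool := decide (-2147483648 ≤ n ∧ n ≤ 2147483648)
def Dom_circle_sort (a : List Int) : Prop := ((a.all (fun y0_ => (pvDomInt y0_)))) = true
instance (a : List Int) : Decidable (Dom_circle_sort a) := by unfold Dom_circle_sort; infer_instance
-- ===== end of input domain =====

-- B replaces the inner recursive generator by an explicit segment stack with a counted
-- pair sweep (same comparison steps, same in-place mutation of `a` as A); equivalence is
-- about the emitted step list.  Both ports run the outer `while swaps` loop on the same
-- fuel (a.length² + 1 rounds), which the behavioural runs never exhaust.

-- ===== PORT A =====
-- a[i] (indices are nonnegative and in range on every admitted run; getD 0 is a totality guard)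
def pyIdx (a : List Int) (i : Int) : Int := (PySem.List.pyGet? a i).getD 0

-- swap(a, x, y): a[x], a[y] = a[y], a[x]
def pySwap (a : List Int) (x y : Int) : List Int :=
  (a.set x.toNat (pyIdx a y)).set y.toNat (pyIdx a x)

-- the `while lo < hi` loop of circle_sort_inner; returns (yields, a, swaps, lo, hi).
-- The Nat argument is fuel bounding the iteration count ((hi-lo).toNat suffices,
-- since lo and hi close in by 2 per step); a totality guard, not part of the Python.
def passLoop : Nat → List Int → Int → Int → Int → List (Int × Int) × List Int × Int × Int × Int
  | 0, a, lo, hi, s => ([], a, s, lo, hi)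
  | f + 1, a, lo, hi, s =>
    if lo < hi then
      let a1 := if pyIdx a lo > pyIdx a hi then pySwap a lo hi else a
      let s1 := if pyIdx a lo > pyIdx a hi then s + 1 else s
      let r := passLoop f a1 (lo + 1) (hi - 1) s1
      ((lo, hi) :: r.1, r.2)
    else ([], a, s, lo, hi)

-- circle_sort_inner; `if lo == hi: return` becomes the `hi ≤ lo` exit (the hi < lo
-- case never occurs on admitted runs: a totality guard).  The Nat argument is fuel
-- bounding the recursion depth (each child segment is strictly shorter, so len(a)
-- suffices at the top); returns (yields, a, swaps).
def innerRec : Nat → List Int → Int → Int → Int → List (Int × Int) × List Int × Int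
  | 0, a, _, _, s => ([], a, s)
  | f + 1, a, lo, hi, s =>
    if hi ≤ lo then ([], a, s)
    else
      let lower := lo
      let upper := hi
      let mid := PySem.Int.floordiv (hi - lo) 2
      let r := passLoop (hi - lo).toNat a lo hi s
      let a1 := r.2.1
      let s1 := r.2.2.1
      let lo' := r.2.2.2.1
      let hi' := r.2.2.2.2
      let midYs : List (Int × Int) := if lo' = hi' then [(lo', hi' + 1)] else []
      -- on the middle swap the Python line `swaps['a']` is a no-op: the count stays s1
      let a2 := if lo' = hi' then
                  (if pyIdx a1 lo' > pyIdx a1 (hi' + 1) then pySwap a1 lo' (hi' + 1) else a1)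
                else a1
      let rL := innerRec f a2 lower (lower + mid) s1
      let rR := innerRec f rL.2.1 (lower + mid + 1) upper rL.2.2
      (r.1 ++ midYs ++ rL.1 ++ rR.1, rR.2.1, rR.2.2)

-- the outer `while swaps['a']` loop, on fuel
def roundLoop : Nat → List Int → Int → List (Int × Int)
  | 0, _, _ => []
  | f + 1, a, s =>
    if s ≠ 0 then
      let r := innerRec a.length a 0 ((a.length : Int) - 1) 0
      r.1 ++ roundLoop f r.2.1 r.2.2
    else []

def circle_sort (a : List Int) : List (Int × Int) :=
  roundLoop (a.length * a.length + 1) a 1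

-- ===== PORT B =====
-- `for k in range(pairs)` of Source B, counting down the remaining iterations; state (a, k, s)
def bSweep (lo hi : Int) : Nat → List Int → Int → Int → List (Int × Int) × List Int × Int
  | 0, a, _, s => ([], a, s)
  | r + 1, a, k, s =>
    let i := lo + k
    let j := hi - k
    let ai := (PySem.List.pyGet? a i).getD 0
    let aj := (PySem.List.pyGet? a j).getD 0
    let a1 := if ai > aj then (a.set i.toNat aj).set j.toNat ai else a
    let s1 := if ai > aj then s + 1 else s
    let rest := bSweep lo hi r a1 (k + 1) s1
    ((i, j) :: rest.1, rest.2)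

-- the `while stack` loop of Source B; the Nat argument is a fuel bound on the number of
-- pops (each pop strictly decreases the total segment weight, so 2*len(a)+1 suffices
-- for the initial stack [(0, len(a)-1)]); it is a totality guard, not part of Source B
def innerStack : Nat → List Int → Int → List (Int × Int) → List (Int × Int) × List Int × Int
  | 0, a, s, _ => ([], a, s)
  | _ + 1, a, s, [] => ([], a, s)
  | f + 1, a, s, (lo, hi) :: rest =>
    if hi - lo ≤ 0 then innerStack f a s rest
    else
      let d := hi - lo
      let pairs := PySem.Int.floordiv (d + 1) 2
      let r := bSweep lo hi pairs.toNat a 0 s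
      let m := lo + pairs
      let midY : List (Int × Int) := if PySem.Int.mod d 2 = 0 then [(m, m + 1)] else []
      let a2 := if PySem.Int.mod d 2 = 0 then
                  (let am := (PySem.List.pyGet? r.2.1 m).getD 0
                   let am1 := (PySem.List.pyGet? r.2.1 (m + 1)).getD 0
                   if am > am1 then (r.2.1.set m.toNat am1).set (m + 1).toNat am else r.2.1)
                else r.2.1
      let mid := PySem.Int.floordiv d 2
      let rec' := innerStack f a2 r.2.2 ((lo, lo + mid) :: (lo + mid + 1, hi) :: rest)
      (r.1 ++ midY ++ rec'.1, rec'.2)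

def roundLoopB : Nat → List Int → Int → List (Int × Int)
  | 0, _, _ => []
  | f + 1, a, s =>
    if s ≠ 0 then
      let r := innerStack (2 * a.length + 1) a 0 [(0, (a.length : Int) - 1)]
      r.1 ++ roundLoopB f r.2.1 r.2.2
    else []

def circle_sort_alt (a : List Int) : List (Int × Int) :=
  roundLoopB (a.length * a.length + 1) a 1

-- ===== PRECONDITION & SPEC =====
-- Pre_ excludes only the empty list, on which Python A recurses forever (RecursionError).
def Pre_circle_sort (a : List Int) : Prop := a ≠ []
instance (a : List Int) : Decidable (Pre_circle_sort a) := by unfold Pre_circle_sort; infer_instance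
def pvWitness_circle_sort : List Int := ([3, 1, 2] : List Int)

def Spec_circle_sort (a : List Int) (out : List (Int × Int)) : Prop := out = circle_sort_alt a
instance (a : List Int) (out : List (Int × Int)) : Decidable (Spec_circle_sort a out) := by
  unfold Spec_circle_sort; infer_instance

-- ===== CLAIM (what is proved, stated in full; the proofs are below) =====
def Claim_equal_circle_sort : Prop :=
  ∀ (a : List Int), Dom_circle_sort a → Pre_circle_sort a → Spec_circle_sort a (circle_sort a)

-- ===== LEMMAS AND PROOFS =====

lemma bSweep_shift (r : Nat) : ∀ (a : List Int) (lo hi k s : Int),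
    bSweep lo hi r a (k + 1) s = bSweep (lo + 1) (hi - 1) r a k s := by
  induction r with
  | zero => intro a lo hi k s; rfl
  | succ r ih =>
    intro a lo hi k s
    simp only [bSweep]
    have hi' : lo + (k + 1) = lo + 1 + k := by ring
    have hj' : hi - (k + 1) = hi - 1 - k := by ring
    rw [hi', hj', ih]

lemma pass_eq (r : Nat) : ∀ (f : Nat) (a : List Int) (lo hi s : Int),
    2 * (r : Int) ≤ hi - lo + 1 → hi - lo + 1 ≤ 2 * (r : Int) + 1 → r ≤ f →
    passLoop f a lo hi s =
      ((bSweep lo hi r a 0 s).1, (bSweep lo hi r a 0 s).2.1,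
       (bSweep lo hi r a 0 s).2.2, lo + (r : Int), hi - (r : Int)) := by
  induction r with
  | zero =>
    intro f a lo hi s h1 h2 _
    have hnl : ¬ lo < hi := by push_cast at h2; omega
    cases f with
    | zero => simp [passLoop, bSweep]
    | succ f => rw [passLoop]; simp [hnl, bSweep]
  | succ r ih =>
    intro f a lo hi s h1 h2 hrf
    have hlt : lo < hi := by push_cast at h1; omega
    cases f with
    | zero => exact absurd hrf (by omega)
    | succ f =>
      rw [passLoop]
      simp only [hlt, if_pos]
      rw [ih f _ (lo + 1) (hi - 1) _ (by push_cast at h1 ⊢; omega)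
            (by push_cast at h2 ⊢; omega) (by omega)]
      simp only [bSweep, bSweep_shift, pyIdx, pySwap, add_zero, sub_zero, Prod.mk.injEq]
      refine ⟨rfl, rfl, rfl, by push_cast; ring, by push_cast; ring⟩

-- fuel does not matter once it exceeds the segment length
lemma innerRec_fuel : ∀ (f g : Nat) (lo hi : Int), hi - lo < (f : Int) → hi - lo < (g : Int) →
    ∀ (a : List Int) (s : Int), innerRec f a lo hi s = innerRec g a lo hi s := by
  intro f
  induction f with
  | zero =>
    intro g lo hi hf hg a s
    have hle : hi ≤ lo := by omega
    cases g with
    | zero => rfl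
    | succ g => rw [innerRec, innerRec, if_pos hle]
  | succ f ih =>
    intro g lo hi hf hg a s
    cases g with
    | zero =>
      have hle : hi ≤ lo := by omega
      rw [innerRec, innerRec, if_pos hle]
    | succ g =>
      rw [innerRec, innerRec]
      by_cases hle : hi ≤ lo
      · rw [if_pos hle, if_pos hle]
      · rw [if_neg hle, if_neg hle]
        dsimp only
        have hm2 : PySem.Int.floordiv (hi - lo) 2 = (hi - lo) / 2 :=
          PySem.Int.floordiv_eq_ediv_of_pos (by omega)
        rw [ih g lo (lo + PySem.Int.floordiv (hi - lo) 2) (by rw [hm2]; omega)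
              (by rw [hm2]; omega)]
        rw [ih g (lo + PySem.Int.floordiv (hi - lo) 2 + 1) hi (by rw [hm2]; omega)
              (by rw [hm2]; omega)]

-- innerRec's first layer, re-expressed in the vocabulary of B's stack body
-- innerRec's first layer, re-expressed in the vocabulary of B's stack body
lemma innerRec_eq (f : Nat) (a : List Int) (lo hi s : Int) (h : 0 < hi - lo) :
    innerRec (f + 1) a lo hi s =
      (let pairs := PySem.Int.floordiv (hi - lo + 1) 2
       let r := bSweep lo hi pairs.toNat a 0 s
       let m := lo + pairs
       let midY : List (Int × Int) := if PySem.Int.mod (hi - lo) 2 = 0 then [(m, m + 1)] else []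
       let a2 := if PySem.Int.mod (hi - lo) 2 = 0 then
                   (let am := (PySem.List.pyGet? r.2.1 m).getD 0
                    let am1 := (PySem.List.pyGet? r.2.1 (m + 1)).getD 0
                    if am > am1 then (r.2.1.set m.toNat am1).set (m + 1).toNat am else r.2.1)
                 else r.2.1
       let mid := PySem.Int.floordiv (hi - lo) 2
       let rL := innerRec f a2 lo (lo + mid) r.2.2
       let rR := innerRec f rL.2.1 (lo + mid + 1) hi rL.2.2
       (r.1 ++ midY ++ rL.1 ++ rR.1, rR.2.1, rR.2.2)) := by
  have hp : PySem.Int.floordiv (hi - lo + 1) 2 = (hi - lo + 1) / 2 :=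
    PySem.Int.floordiv_eq_ediv_of_pos (by omega)
  have hmod : PySem.Int.mod (hi - lo) 2 = (hi - lo) % 2 :=
    PySem.Int.mod_eq_emod_of_pos (by omega)
  have hRp : ((PySem.Int.floordiv (hi - lo + 1) 2).toNat : Int)
           = PySem.Int.floordiv (hi - lo + 1) 2 := by rw [hp]; omega
  rw [innerRec, if_neg (by omega : ¬ hi ≤ lo)]
  rw [pass_eq ((PySem.Int.floordiv (hi - lo + 1) 2).toNat) ((hi - lo).toNat) a lo hi s
        (by rw [hRp, hp]; omega) (by rw [hRp, hp]; omega) (by have := hRp; have := hp; omega)]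
  dsimp only
  rw [hRp, hmod]
  generalize hP : PySem.Int.floordiv (hi - lo + 1) 2 = P at hp hRp
  generalize hM : PySem.Int.floordiv (hi - lo) 2 = M
  generalize hB : bSweep lo hi P.toNat a 0 s = B
  by_cases hev : (hi - lo) % 2 = 0
  · have hc : lo + P = hi - P := by omega
    have he : hi - P + 1 = lo + P + 1 := by omega
    simp only [pyIdx, pySwap, if_pos hc, if_pos hev, he]
  · have hc : ¬ (lo + P = hi - P) := by omega
    simp only [if_neg hc, if_neg hev]

-- sequential (recursive) processing of a stack of segments, used only by the proofs
def seqRun : List Int → Int → List (Int × Int) → List (Int × Int) × List Int × Int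
  | a, s, [] => ([], a, s)
  | a, s, (lo, hi) :: rest =>
    let r := innerRec ((hi - lo).toNat + 1) a lo hi s
    let r2 := seqRun r.2.1 r.2.2 rest
    (r.1 ++ r2.1, r2.2)

lemma innerStack_eq_seq (f : Nat) : ∀ (stack : List (Int × Int)) (a : List Int) (s : Int),
    (stack.map (fun p => 2 * (p.2 - p.1).toNat + 1)).sum ≤ f →
    innerStack f a s stack = seqRun a s stack := by
  induction f with
  | zero =>
    intro stack a s h
    match stack with
    | [] => rfl
    | (lo, hi) :: rest => simp at h
  | succ f ih =>
    intro stack a s h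
    match stack with
    | [] => rfl
    | (lo, hi) :: rest =>
      by_cases hd : hi - lo ≤ 0
      · rw [innerStack, if_pos hd]
        rw [ih rest a s (by simp at h ⊢; omega)]
        show _ = seqRun a s ((lo, hi) :: rest)
        rw [seqRun]
        rw [innerRec_fuel ((hi - lo).toNat + 1) 1 lo hi (by omega) (by omega)]
        rw [innerRec, if_pos (show hi ≤ lo by omega)]
        simp
      · rw [innerStack, if_neg hd]
        dsimp only
        have hm2 : PySem.Int.floordiv (hi - lo) 2 = (hi - lo) / 2 :=
          PySem.Int.floordiv_eq_ediv_of_pos (by omega)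
        rw [ih ((lo, lo + PySem.Int.floordiv (hi - lo) 2) ::
                (lo + PySem.Int.floordiv (hi - lo) 2 + 1, hi) :: rest) _ _
              (by simp only [List.map_cons, List.sum_cons] at h ⊢; rw [hm2] at *; omega)]
        show _ = seqRun a s ((lo, hi) :: rest)
        conv_rhs => rw [seqRun]
        rw [innerRec_eq ((hi - lo).toNat) a lo hi s (by omega)]
        dsimp only
        rw [innerRec_fuel ((hi - lo).toNat) ((lo + PySem.Int.floordiv (hi - lo) 2 - lo).toNat + 1)
              lo (lo + PySem.Int.floordiv (hi - lo) 2) (by rw [hm2]; omega) (by rw [hm2]; omega)]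
        rw [innerRec_fuel ((hi - lo).toNat) ((hi - (lo + PySem.Int.floordiv (hi - lo) 2 + 1)).toNat + 1)
              (lo + PySem.Int.floordiv (hi - lo) 2 + 1) hi (by rw [hm2]; omega) (by rw [hm2]; omega)]
        generalize PySem.Int.floordiv (hi - lo + 1) 2 = P
        generalize PySem.Int.floordiv (hi - lo) 2 = M
        generalize bSweep lo hi P.toNat a 0 s = B
        generalize (if PySem.Int.mod (hi - lo) 2 = 0 then
              if (PySem.List.pyGet? B.2.1 (lo + P)).getD 0 > (PySem.List.pyGet? B.2.1 (lo + P + 1)).getD 0 then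
                (B.2.1.set (lo + P).toNat ((PySem.List.pyGet? B.2.1 (lo + P + 1)).getD 0)).set (lo + P + 1).toNat
                  ((PySem.List.pyGet? B.2.1 (lo + P)).getD 0)
              else B.2.1
            else B.2.1) = A2
        simp only [seqRun, List.append_assoc]

lemma roundLoop_eq (f : Nat) : ∀ (a : List Int) (s : Int), roundLoop f a s = roundLoopB f a s := by
  induction f with
  | zero => intro a s; rfl
  | succ f ih =>
    intro a s
    rw [roundLoop, roundLoopB]
    by_cases hs : s ≠ 0
    · rw [if_pos hs, if_pos hs]
      rw [innerStack_eq_seq (2 * a.length + 1) _ _ _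
            (by simp only [List.map_cons, List.map_nil, List.sum_cons, List.sum_nil]; omega)]
      rw [seqRun]
      rw [innerRec_fuel a.length (((a.length : Int) - 1 - 0).toNat + 1) 0 ((a.length : Int) - 1)
            (by omega) (by omega)]
      simp only [seqRun, List.append_nil, ih]
    · simp [hs]

-- ===== VERDICT (by name: the statement is the Claim_ definition above) =====
theorem circle_sort_spec : Claim_equal_circle_sort := by
  intro a _ _
  show circle_sort a = circle_sort_alt a
  unfold circle_sort circle_sort_alt
  exact roundLoop_eq _ a 1
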